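-- pv_equiv track=rewrite | github.com/hyungmogu/algorithm-and-data-structure-exercises | codility_practice/catepillar_method/count_distinct_slices_04.py | solution
-- ===== SOURCE A (Python) =====
-- def solution(M, A):
--     # write your code in Python 3.6
--     N = len(A)
--     SLICES_THRESHOLD = 1000000000
--
--     numbers_set = set()
--     front, total = 0, 0
--     for back in range(N):
--         while (front < N) and (A[front] not in numbers_set):
--             numbers_set.add(A[front])
--             total += (front - back) + 1
--
--             if total > SLICES_THRESHOLD:
--                 return SLICES_THRESHOLD
--
--             front += 1
--
--         numbers_set.remove(A[back])
--
--     return total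
-- ===== SOURCE B (Python) =====
-- def solution(M, A):
--     SLICES_THRESHOLD = 1000000000
--     last_seen = {}
--     left = 0
--     total = 0
--     for right in range(len(A)):
--         v = A[right]
--         if v in last_seen:
--             left = max(left, last_seen[v] + 1)
--         last_seen[v] = right
--         total += right - left + 1
--         if total > SLICES_THRESHOLD:
--             return SLICES_THRESHOLD
--     return total
-- ===== Notes on version B (the rewrite author's own statement) =====
-- stated objective: alternative
-- what changed: Replaces the nested while-with-set-removal caterpillar by a single pass that jumps the left boundary using a last-seen-index dict and adds the window length per right endpoint.
import Mathlib
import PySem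

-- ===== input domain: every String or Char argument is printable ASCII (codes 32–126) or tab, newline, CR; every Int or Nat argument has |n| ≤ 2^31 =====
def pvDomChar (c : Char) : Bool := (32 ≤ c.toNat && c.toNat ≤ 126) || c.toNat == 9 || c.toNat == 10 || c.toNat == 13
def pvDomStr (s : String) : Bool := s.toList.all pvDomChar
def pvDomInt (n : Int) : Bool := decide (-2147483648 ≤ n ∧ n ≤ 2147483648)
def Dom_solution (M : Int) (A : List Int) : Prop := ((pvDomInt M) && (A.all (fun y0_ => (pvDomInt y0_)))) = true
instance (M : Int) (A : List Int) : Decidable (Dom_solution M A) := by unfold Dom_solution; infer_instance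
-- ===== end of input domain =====

-- B replaces A's nested while-with-set-removal caterpillar by a single last-seen-index
-- pass that jumps the left boundary (objective: alternative single-loop decomposition).


def pvTH : Int := 1000000000

-- ===== PORT A =====
-- the inner 'while (front < N) and (A[front] not in numbers_set)' loop;
-- 'none' models the early 'return SLICES_THRESHOLD'
def innerA (A : List Int) (N : Nat) (back : Nat) (S : PySem.Set Int) (front : Nat)
    (total : Int) : Option (PySem.Set Int × Nat × Int) :=
  if h : front < N ∧ ¬ (A.getD front 0 ∈ S) then
    if total + ((front : Int) - (back : Int)) + 1 > pvTH then none
    else innerA A N back (PySem.Set.add S (A.getD front 0)) (front + 1)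
      (total + ((front : Int) - (back : Int)) + 1)
  else some (S, front, total)
termination_by N - front
decreasing_by omega

-- the outer 'for back in range(N)' loop.  'numbers_set.remove(A[back])' never raises
-- (A[back] is always in the set when it runs), so Set.discard is exact here.
def outerA (A : List Int) (N : Nat) (back : Nat) (S : PySem.Set Int) (front : Nat)
    (total : Int) : Int :=
  if back < N then
    match innerA A N back S front total with
    | none => pvTH
    | some (S', front', total') =>
        outerA A N (back + 1) (PySem.Set.discard S' (A.getD back 0)) front' total'
  else total
termination_by N - back
decreasing_by omega

def solution (M : Int) (A : List Int) : Int :=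
  outerA A A.length 0 PySem.Set.empty 0 0

-- ===== PORT B =====
-- the 'for right in range(N)' loop of Source B, state = (last_seen, left, total);
-- 'if v in last_seen: left = max(left, last_seen[v] + 1)' is the contains/getD branch
-- (getD's default is never used: it is guarded by contains)
def loopB (A : List Int) (N : Nat) (right : Nat) (d : PySem.Dict Int Int) (left : Int)
    (total : Int) : Int :=
  if right < N then
    let left' := if d.contains (A.getD right 0) then max left (d.getD (A.getD right 0) 0 + 1) else left
    if total + ((right : Int) - left' + 1) > pvTH then pvTH
    else loopB A N (right + 1) (d.insert (A.getD right 0) (right : Int)) left'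
      (total + ((right : Int) - left' + 1))
  else total
termination_by N - right
decreasing_by omega

def solution_alt (M : Int) (A : List Int) : Int :=
  loopB A A.length 0 PySem.Dict.empty 0 0

-- ===== PRECONDITION & SPEC =====
def Spec_solution (M : Int) (A : List Int) (out : Int) : Prop := out = solution_alt M A
instance (M : Int) (A : List Int) (out : Int) : Decidable (Spec_solution M A out) := by unfold Spec_solution; infer_instance

-- ===== CLAIM (what is proved, stated in full; the proofs are below) =====
def Claim_equal_solution : Prop := ∀ (M : Int) (A : List Int), Dom_solution M A → Spec_solution M A (solution M A)

-- ===== LEMMAS AND PROOFS =====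

-- capped accumulation of a list of increments
def capFold (t : Int) : List Int → Int
  | [] => t
  | x :: xs => if t + x > pvTH then pvTH else capFold (t + x) xs

theorem capFold_cons (t x : Int) (xs : List Int) :
    capFold t (x :: xs) = if t + x > pvTH then pvTH else capFold (t + x) xs := rfl

-- largest j < r with A[j] = v
def lastIdx (A : List Int) (v : Int) : Nat → Option Nat
  | 0 => none
  | r + 1 => if A.getD r 0 = v then some r else lastIdx A v r

-- the left boundary B uses at step r (minimal l with A[l..r] distinct)
def Lf (A : List Int) : Nat → Int
  | 0 => 0
  | r + 1 => (lastIdx A (A.getD (r + 1) 0) (r + 1)).elim (Lf A r)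
      (fun j => max (Lf A r) ((j : Int) + 1))

theorem Lf_succ (A : List Int) (r : Nat) :
    Lf A (r + 1) = (lastIdx A (A.getD (r + 1) 0) (r + 1)).elim (Lf A r)
      (fun j => max (Lf A r) ((j : Int) + 1)) := rfl

-- the window A[b..f-1] as a list
def win (A : List Int) (b f : Nat) : List Int :=
  (List.range' b (f - b)).map (fun i => A.getD i 0)

-- increments contributed at right endpoints f, f+1, …, f+n-1
def incs (A : List Int) (f n : Nat) : List Int :=
  (List.range' f n).map (fun r : Nat => (r : Int) - Lf A r + 1)

theorem lastIdx_spec (A : List Int) (v : Int) (r : Nat) (j : Nat)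
    (h : lastIdx A v r = some j) : j < r ∧ A.getD j 0 = v := by
  induction r with
  | zero => simp [lastIdx] at h
  | succ s ih =>
    unfold lastIdx at h
    split at h
    · cases h; exact ⟨by omega, by assumption⟩
    · rcases ih h with ⟨h1, h2⟩; exact ⟨Nat.lt_succ_of_lt h1, h2⟩

theorem lastIdx_ge (A : List Int) (v : Int) (r j : Nat) (hj : j < r)
    (hv : A.getD j 0 = v) : ∃ j', lastIdx A v r = some j' ∧ j ≤ j' := by
  induction r with
  | zero => omega
  | succ s ih =>
    unfold lastIdx
    split
    · exact ⟨s, rfl, by omega⟩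
    · rcases Nat.lt_succ_iff_lt_or_eq.mp hj with h | h
      · rcases ih h with ⟨j', h1, h2⟩; exact ⟨j', h1, h2⟩
      · subst h; simp_all

theorem Lf_le (A : List Int) (r : Nat) : Lf A r ≤ (r : Int) := by
  induction r with
  | zero => simp [Lf]
  | succ s ih =>
    rw [Lf_succ]
    cases h : lastIdx A (A.getD (s + 1) 0) (s + 1) with
    | none => simp only [Option.elim]; push_cast; omega
    | some j =>
      have hj : j < s + 1 := (lastIdx_spec A _ _ _ h).1
      simp only [Option.elim]
      have h1 : Lf A s ≤ ((s : Int) + 1) := le_trans ih (by omega)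
      have h2 : (j : Int) + 1 ≤ (s : Int) + 1 := by exact_mod_cast hj
      push_cast
      exact max_le h1 h2

theorem Lf_mono (A : List Int) (r : Nat) : Lf A r ≤ Lf A (r + 1) := by
  rw [Lf_succ]
  cases lastIdx A (A.getD (r + 1) 0) (r + 1) with
  | none => exact le_refl _
  | some j => exact le_max_left _ _

theorem Lf_ge_of_dup (A : List Int) (j f : Nat) (hj : j < f)
    (hv : A.getD j 0 = A.getD f 0) : (j : Int) + 1 ≤ Lf A f := by
  rcases lastIdx_ge A (A.getD f 0) f j hj hv with ⟨j', h1, h2⟩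
  cases f with
  | zero => omega
  | succ s =>
    rw [Lf_succ, h1]
    simp only [Option.elim]
    have : (j : Int) ≤ (j' : Int) := by exact_mod_cast h2
    exact le_trans (by omega) (le_max_right _ _)

theorem win_empty (A : List Int) (b : Nat) : win A b b = [] := by
  simp [win]

theorem win_split (A : List Int) (b m f : Nat) (h1 : b ≤ m) (h2 : m ≤ f) :
    win A b f = win A b m ++ win A m f := by
  unfold win
  rw [← List.map_append]
  congr 1
  rw [show f - b = (m - b) + (f - m) by omega, ← List.range'_append, one_mul,
    show b + (m - b) = m by omega]

theorem win_cons (A : List Int) (b f : Nat) (h : b < f) :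
    win A b f = A.getD b 0 :: win A (b + 1) f := by
  unfold win
  rw [show f - b = (f - (b + 1)) + 1 by omega, List.range'_succ]
  simp

theorem win_snoc (A : List Int) (b f : Nat) (h : b ≤ f) :
    win A b (f + 1) = win A b f ++ [A.getD f 0] := by
  rw [win_split A b f (f + 1) h (by omega), win_cons A f (f + 1) (by omega), win_empty]

theorem mem_win (A : List Int) (b f i : Nat) (h1 : b ≤ i) (h2 : i < f) :
    A.getD i 0 ∈ win A b f := by
  unfold win
  exact List.mem_map_of_mem (by rw [List.mem_range'_1]; omega)

theorem exists_of_mem_win (A : List Int) (b f : Nat) (v : Int) (h : v ∈ win A b f) :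
    ∃ i, b ≤ i ∧ i < f ∧ A.getD i 0 = v := by
  unfold win at h
  rcases List.mem_map.mp h with ⟨i, hi, hv⟩
  rw [List.mem_range'_1] at hi
  exact ⟨i, by omega, by omega, hv⟩

theorem win_nodup_ne (A : List Int) (l g j i : Nat) (hnd : (win A l g).Nodup)
    (h1 : l ≤ j) (h2 : j < i) (h3 : i < g) : A.getD j 0 ≠ A.getD i 0 := by
  have hsplit : win A l g = win A l j ++ win A j g := win_split A l j g h1 (by omega)
  have hnd2 : (win A j g).Nodup := by
    rw [hsplit] at hnd; exact hnd.of_append_right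
  rw [win_cons A j g (by omega)] at hnd2
  have hmem : A.getD i 0 ∈ win A (j + 1) g := mem_win A (j + 1) g i (by omega) h3
  intro hEq
  rw [hEq] at hnd2
  exact (List.nodup_cons.mp hnd2).1 hmem

-- L(f) ≤ l whenever A[l..f] is duplicate-free
theorem Lf_le_of_nodup (A : List Int) (f : Nat) : ∀ l : Nat, l ≤ f →
    (win A l (f + 1)).Nodup → Lf A f ≤ (l : Int) := by
  induction f with
  | zero => intro l hl _; interval_cases l; simp [Lf]
  | succ s ih =>
    intro l hl hnd
    have hprev : Lf A s ≤ (l : Int) := by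
      rcases Nat.lt_or_ge l (s + 1) with h | h
      · have : (win A l (s + 1)).Nodup := by
          have hsp := win_split A l (s + 1) (s + 2) (by omega) (by omega)
          rw [hsp] at hnd; exact hnd.of_append_left
        exact ih l (by omega) this
      · have hls : l = s + 1 := by omega
        subst hls
        exact le_trans (Lf_le A s) (by push_cast; omega)
    rw [Lf_succ]
    cases h : lastIdx A (A.getD (s + 1) 0) (s + 1) with
    | none => exact hprev
    | some j =>
      simp only [Option.elim]
      rcases lastIdx_spec A _ _ _ h with ⟨hj1, hj2⟩
      have hjl : j < l := by
        by_contra hc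
        exact win_nodup_ne A l (s + 2) j (s + 1) hnd (by omega) hj1 (by omega) hj2
      have : (j : Int) + 1 ≤ (l : Int) := by exact_mod_cast hjl
      exact max_le hprev this

theorem discard_win (A : List Int) (b f : Nat) (h : b < f)
    (hnd : (win A b f).Nodup) :
    PySem.Set.discard (win A b f) (A.getD b 0) = win A (b + 1) f := by
  rw [win_cons A b f h] at hnd ⊢
  have hnotmem : A.getD b 0 ∉ win A (b + 1) f := (List.nodup_cons.mp hnd).1
  unfold PySem.Set.discard
  rw [List.filter_cons]
  simp only [beq_self_eq_true, Bool.not_true, Bool.false_eq_true, if_false]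
  exact List.filter_eq_self.mpr (fun y hy => by
    simp only [Bool.not_eq_eq_eq_not, Bool.not_true, beq_eq_false_iff_ne, ne_eq]
    intro hEq; subst hEq; exact hnotmem hy)

-- ===== B-side characterization =====
theorem loopB_eq (A : List Int) (N : Nat) : ∀ (k r : Nat) (d : PySem.Dict Int Int)
    (left total : Int), N - r = k →
    left = (if r = 0 then 0 else Lf A (r - 1)) →
    (∀ v, d.get? v = (lastIdx A v r).map (fun j => (j : Int))) →
    loopB A N r d left total = capFold total (incs A r (N - r)) := by
  intro k
  induction k with
  | zero =>
    intro r d left total hk _ _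
    unfold loopB
    rw [if_neg (by omega), show N - r = 0 by omega]
    simp [incs, capFold]
  | succ m ih =>
    intro r d left total hk hleft hd
    have hr : r < N := by omega
    have hL : (if d.contains (A.getD r 0) then max left (d.getD (A.getD r 0) 0 + 1) else left)
        = Lf A r := by
      rw [PySem.Dict.contains_eq_isSome_get?, PySem.Dict.getD_eq_get?_getD, hd]
      cases r with
      | zero => simp [lastIdx, hleft, Lf]
      | succ s =>
        rw [hleft]
        simp only [Nat.succ_ne_zero, if_false, Nat.add_sub_cancel, Lf_succ]
        cases h : lastIdx A (A.getD (s + 1) 0) (s + 1) with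
        | none => simp
        | some j => simp
    rw [show N - r = m + 1 by omega]
    unfold loopB
    rw [if_pos hr]
    simp only [hL]
    rw [show incs A r (m + 1) = ((r : Int) - Lf A r + 1) :: incs A (r + 1) m by
      simp [incs, List.range'_succ]]
    rw [capFold_cons]
    split
    · rfl
    · rw [ih (r + 1) _ _ _ (by omega) (by simp) ?_]
      · rw [show N - (r + 1) = m by omega]
      · intro v
        rw [PySem.Dict.get?_insert]
        unfold lastIdx
        by_cases hv : v = A.getD r 0
        · rw [if_pos hv, if_pos hv.symm]; rfl
        · rw [if_neg hv, if_neg (fun hh => hv hh.symm), hd]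

-- ===== A-side characterization =====
theorem innerA_eq (A : List Int) (N : Nat) : ∀ (k b f : Nat) (S : PySem.Set Int)
    (total : Int), N - f = k → b ≤ f → f ≤ N → S = win A b f → (win A b f).Nodup →
    (f < N → (b : Int) ≤ Lf A f) →
    (innerA A N b S f total = none ∧ capFold total (incs A f (N - f)) = pvTH) ∨
    (∃ S' f' total', innerA A N b S f total = some (S', f', total') ∧
      f ≤ f' ∧ f' ≤ N ∧ S' = win A b f' ∧ (win A b f').Nodup ∧
      (f' < N → A.getD f' 0 ∈ win A b f') ∧
      capFold total (incs A f (N - f)) = capFold total' (incs A f' (N - f'))) := by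
  intro k
  induction k with
  | zero =>
    intro b f S total hk hbf hfN hS hnd hbL
    right
    refine ⟨S, f, total, ?_, le_refl f, hfN, hS, hnd, by omega, rfl⟩
    unfold innerA
    rw [dif_neg (by omega)]
  | succ m ih =>
    intro b f S total hk hbf hfN hS hnd hbL
    have hfN' : f < N := by omega
    by_cases hmem : A.getD f 0 ∈ S
    · right
      refine ⟨S, f, total, ?_, le_refl f, hfN, hS, hnd, fun _ => hS ▸ hmem, rfl⟩
      unfold innerA
      rw [dif_neg (by tauto)]
    · -- front advances past f, and at this moment back = Lf A f
      have hnd' : (win A b (f + 1)).Nodup := by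
        rw [win_snoc A b f hbf, List.nodup_append]
        refine ⟨hnd, List.nodup_singleton _, fun x hx y hy => ?_⟩
        rw [List.mem_singleton] at hy
        subst hy
        intro hEq
        subst hEq
        exact hmem (by rw [hS]; exact hx)
      have hLb : Lf A f = (b : Int) :=
        le_antisymm (Lf_le_of_nodup A f b hbf hnd') (hbL hfN')
      have hinc : total + ((f : Int) - (b : Int)) + 1
          = total + ((f : Int) - Lf A f + 1) := by rw [hLb]; ring
      have hcap : incs A f (N - f)
          = ((f : Int) - Lf A f + 1) :: incs A (f + 1) (N - (f + 1)) := by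
        rw [show N - f = (N - (f + 1)) + 1 by omega]
        simp [incs, List.range'_succ]
      unfold innerA
      rw [dif_pos ⟨hfN', hmem⟩, hcap, capFold_cons]
      by_cases hth : total + ((f : Int) - (b : Int)) + 1 > pvTH
      · left
        exact ⟨by rw [if_pos hth], by rw [if_pos (by rw [← hinc]; exact hth)]⟩
      · rw [if_neg hth, if_neg (by rw [← hinc]; exact hth)]
        have hS' : PySem.Set.add S (A.getD f 0) = win A b (f + 1) := by
          rw [PySem.Set.add_of_not_mem hmem, hS, win_snoc A b f hbf]
        have hbL' : (f + 1 < N) → (b : Int) ≤ Lf A (f + 1) := fun _ =>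
          le_trans (le_of_eq hLb.symm) (Lf_mono A f)
        rcases ih b (f + 1) _ (total + ((f : Int) - (b : Int)) + 1) (by omega)
            (by omega) (by omega) hS' hnd' hbL' with
          ⟨h1, h2⟩ | ⟨S', f', total', h1, h2, h3, h4, h5, h6, h7⟩
        · left
          exact ⟨h1, by rw [hinc] at h2; exact h2⟩
        · right
          exact ⟨S', f', total', h1, by omega, h3, h4, h5, h6, by rw [hinc] at h7; exact h7⟩

theorem outerA_eq (A : List Int) (N : Nat) : ∀ (k b f : Nat) (S : PySem.Set Int)
    (total : Int), N - b = k → b ≤ f → f ≤ N → S = win A b f → (win A b f).Nodup →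
    (f < N → (b : Int) ≤ Lf A f) →
    outerA A N b S f total = capFold total (incs A f (N - f)) := by
  intro k
  induction k with
  | zero =>
    intro b f S total hk hbf hfN hS hnd hbL
    have hfe : f = N := by omega
    subst hfe
    unfold outerA
    rw [if_neg (by omega)]
    simp [incs, capFold]
  | succ m ih =>
    intro b f S total hk hbf hfN hS hnd hbL
    have hbN : b < N := by omega
    unfold outerA
    rw [if_pos hbN]
    rcases innerA_eq A N (N - f) b f S total rfl hbf hfN hS hnd hbL with
      ⟨h1, h2⟩ | ⟨S', f', total', h1, h2, h3, h4, h5, h6, h7⟩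
    · rw [h1, h2]
    · rw [h1]
      show outerA A N (b + 1) (PySem.Set.discard S' (A.getD b 0)) f' total'
          = capFold total (incs A f (N - f))
      have hbf' : b < f' := by
        rcases Nat.lt_or_ge f' N with h | h
        · rcases exists_of_mem_win A b f' _ (h6 h) with ⟨i, hi1, hi2, _⟩
          omega
        · omega
      have hbL' : f' < N → ((b + 1 : Nat) : Int) ≤ Lf A f' := by
        intro hf'
        rcases exists_of_mem_win A b f' _ (h6 hf') with ⟨i, hi1, hi2, hi3⟩
        have hd := Lf_ge_of_dup A i f' hi2 hi3
        have hbi : (b : Int) ≤ (i : Int) := by exact_mod_cast hi1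
        push_cast
        omega
      have hwin' : PySem.Set.discard S' (A.getD b 0) = win A (b + 1) f' := by
        rw [h4]; exact discard_win A b f' hbf' h5
      have hnd'' : (win A (b + 1) f').Nodup := by
        rw [win_cons A b f' hbf'] at h5
        exact (List.nodup_cons.mp h5).2
      rw [ih (b + 1) f' _ total' (by omega) (by omega) h3 hwin' hnd'' hbL', h7]

-- ===== VERDICT (by name: the statement is the Claim_ definition above) =====
theorem solution_spec : Claim_equal_solution := by
  intro M A _
  unfold Spec_solution solution solution_alt
  rw [outerA_eq A A.length A.length 0 0 PySem.Set.empty 0 rfl (by omega) (by omega)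
    (by simp [win, PySem.Set.empty]) (by simp [win]) (by intro _; simp [Lf])]
  rw [loopB_eq A A.length A.length 0 PySem.Dict.empty 0 0 rfl (by simp)
    (by intro v; simp [lastIdx, PySem.Dict.get?_empty])]
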